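-- pv_equiv track=rewrite | github.com/pe3ep/ExamPrep | 9/7635_polyakov/main.py | n1
-- ===== SOURCE A (Python) =====
-- def n1(l: list[int]):
--   c = 0
--   for i in l:
--     if (l.count(i) != 3 and l.count(i) != 1):
--       return False
--     if (l.count(i) == 3):
--       c += 1
--   if c == 3:
--     return True
--   return False
-- ===== SOURCE B (Python) =====
-- def n1(l: list[int]):
--   counts = {}
--   for i in l:
--     counts[i] = counts.get(i, 0) + 1
--   triples = 0
--   for v in counts.values():
--     if v != 1 and v != 3:
--       return False
--     if v == 3:
--       triples += 1
--   return triples == 1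
-- ===== Notes on version B (the rewrite author's own statement) =====
-- stated objective: faster
-- what changed: B builds a frequency dictionary in one pass and checks the multiplicity of each distinct value once (exactly one value of count 3, all others count 1), instead of A's loop calling l.count(i) for every element.
import Mathlib
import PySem

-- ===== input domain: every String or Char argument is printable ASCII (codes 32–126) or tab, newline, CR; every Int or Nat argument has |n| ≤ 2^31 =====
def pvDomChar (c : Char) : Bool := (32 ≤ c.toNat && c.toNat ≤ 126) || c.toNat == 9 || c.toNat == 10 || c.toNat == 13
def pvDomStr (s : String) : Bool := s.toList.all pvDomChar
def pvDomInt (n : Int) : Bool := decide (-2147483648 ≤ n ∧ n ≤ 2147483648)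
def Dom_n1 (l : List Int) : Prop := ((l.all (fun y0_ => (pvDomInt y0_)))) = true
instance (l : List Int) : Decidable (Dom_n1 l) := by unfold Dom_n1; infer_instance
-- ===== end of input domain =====

-- B replaces A's per-element l.count scans by a frequency dictionary built in one pass (faster).


-- ===== PORT A =====
-- loop over the remaining elements, with c the running count; early 'return False' = result false
def n1Loop (l : List Int) (rest : List Int) (c : Int) : Bool :=
  match rest with
  | [] => if c == 3 then true else false
  | i :: t =>
      if (PySem.List.count l i != 3) && (PySem.List.count l i != 1) then false
      else n1Loop l t (if PySem.List.count l i == 3 then c + 1 else c)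

def n1 (l : List Int) : Bool := n1Loop l l 0

-- ===== PORT B =====
-- loop over the dict's values, with triples the running count; early 'return False' = result false
def n1AltLoop (vals : List Int) (triples : Int) : Bool :=
  match vals with
  | [] => triples == 1
  | v :: t =>
      if (v != 1) && (v != 3) then false
      else n1AltLoop t (if v == 3 then triples + 1 else triples)

def n1_alt (l : List Int) : Bool :=
  let counts := l.foldl (fun d x => d.insert x (d.getD x 0 + 1)) PySem.Dict.empty
  n1AltLoop counts.values 0

-- ===== PRECONDITION & SPEC =====
def Spec_n1 (l : List Int) (out : Bool) : Prop := out = n1_alt l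
instance (l : List Int) (out : Bool) : Decidable (Spec_n1 l out) := by unfold Spec_n1; infer_instance

-- ===== CLAIM (what is proved, stated in full; the proofs are below) =====
def Claim_equal_n1 : Prop := ∀ (l : List Int), Dom_n1 l → Spec_n1 l (n1 l)

-- ===== LEMMAS AND PROOFS =====

-- A's loop: all counts are 1 or 3, and c plus the number of remaining elements with count 3 is 3
theorem n1Loop_eq (l rest : List Int) (c : Int) :
    n1Loop l rest c =
      (rest.all (fun i => (l.count i == 3) || (l.count i == 1))
        && decide (c + (rest.countP (fun i => l.count i == 3) : Int) = 3)) := by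
  induction rest generalizing c with
  | nil => simp [n1Loop]
  | cons i t ih =>
    simp only [n1Loop, PySem.List.count_eq, List.all_cons, List.countP_cons]
    by_cases h3 : l.count i = 3
    · simp [h3, ih]
      congr 1
      simp only [decide_eq_decide]
      omega
    · by_cases h1 : l.count i = 1
      · simp [h1, ih]
      · simp [h3, h1]

-- B's loop: all values are 1 or 3, and triples plus the number of remaining 3s is 1
theorem n1AltLoop_eq (vals : List Int) (triples : Int) :
    n1AltLoop vals triples =
      (vals.all (fun v => (v == 1) || (v == 3))
        && decide (triples + (vals.countP (fun v => v == 3) : Int) = 1)) := by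
  induction vals generalizing triples with
  | nil => by_cases h : triples = 1 <;> simp [n1AltLoop, h]
  | cons v t ih =>
    simp only [n1AltLoop, List.all_cons, List.countP_cons]
    by_cases h3 : v = 3
    · simp [h3, ih]
      congr 1
      simp only [decide_eq_decide]
      omega
    · by_cases h1 : v = 1
      · simp [h1, ih]
      · simp [h3, h1]

theorem values_counter (l : List Int) :
    (l.foldl (fun d x => d.insert x (d.getD x 0 + 1)) PySem.Dict.empty).values
      = (PySem.Set.ofList l).map (fun k => (l.count k : Int)) := by
  rw [PySem.Dict.foldl_insert_getD_add_one_eq_counter]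
  show (PySem.Dict.counter l).items.map (·.2) = _
  rw [PySem.Dict.items_counter]
  simp [List.map_map, Function.comp]

theorem dedup_perm_ofList (l : List Int) : l.dedup.Perm (PySem.Set.ofList l) := by
  apply (List.perm_ext_iff_of_nodup l.nodup_dedup (PySem.Set.nodup_ofList l)).2
  intro a
  simp [List.mem_dedup, PySem.Set.mem_ofList]

-- number of elements whose count is 3 = 3 * number of distinct values whose count is 3
theorem countP_count_three (l : List Int) :
    l.countP (fun i => l.count i == 3)
      = 3 * (PySem.Set.ofList l).countP (fun k => l.count k == 3) := by
  rw [← List.sum_map_count_dedup_filter_eq_countP (fun i => l.count i == 3) l]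
  have hall : ∀ x ∈ (l.dedup.filter (fun i => l.count i == 3)).map (fun x => l.count x), x = 3 := by
    intro x hx
    simp only [List.mem_map, List.mem_filter, beq_iff_eq] at hx
    obtain ⟨y, ⟨-, hy⟩, rfl⟩ := hx
    exact hy
  rw [List.sum_eq_card_nsmul _ 3 hall]
  simp only [List.length_map, smul_eq_mul]
  rw [← List.countP_eq_length_filter, (dedup_perm_ofList l).countP_eq (fun k => l.count k == 3)]
  ring

-- ===== VERDICT (by name: the statement is the Claim_ definition above) =====
theorem n1_spec : Claim_equal_n1 := by
  intro l _
  show n1 l = n1_alt l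
  rw [n1, n1_alt]
  simp only [n1Loop_eq, n1AltLoop_eq, values_counter]
  congr 1
  · -- the "all counts are 1 or 3" parts agree
    rw [Bool.eq_iff_iff]
    simp only [List.all_map, List.all_eq_true, Function.comp]
    constructor
    · intro h k hk
      have := h k ((PySem.Set.mem_ofList l k).1 hk)
      revert this
      simp only [Bool.or_eq_true, beq_iff_eq]
      intro h'
      rcases h' with h' | h' <;> simp [h']
    · intro h i hi
      have := h i ((PySem.Set.mem_ofList l i).2 hi)
      revert this
      simp only [Bool.or_eq_true, beq_iff_eq]
      intro h'
      rcases h' with h' | h' <;> omega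
  · -- 3 * t = 3  ↔  t = 1
    have : ((PySem.Set.ofList l).map (fun k => (l.count k : Int))).countP (fun v => v == 3)
        = (PySem.Set.ofList l).countP (fun k => l.count k == 3) := by
      rw [List.countP_map]
      apply List.countP_congr
      intro k _
      simp only [Function.comp, beq_iff_eq]
      constructor <;> intro h <;> omega
    rw [this, countP_count_three]
    simp only [decide_eq_decide]
    omega
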